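-- pv_equiv track=rewrite | github.com/truprecht/disutapa | sdcp/grammar/parser.py | gapscore
-- ===== SOURCE A (Python) =====
-- def gapscore(positions, totallen: int):
--     last_included = False
--     score = 0
--     for i in range(totallen):
--         if not i in positions:
--             score += 1 if not last_included else 2
--             last_included = False
--         else:
--             last_included = True
--     return score
-- ===== SOURCE B (Python) =====
-- def gapscore(positions, totallen: int):
--     # O(|positions|): base count of excluded cells + one extra point per
--     # included->excluded boundary, found by scanning the position set only.
--     ps = set(positions)
--     included = {p for p in ps if 0 <= p < totallen}
--     extra = sum(1 for p in included if p + 1 < totallen and p + 1 not in ps)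
--     return max(totallen, 0) - len(included) + extra
-- ===== Notes on version B (the rewrite author's own statement) =====
-- stated objective: faster
-- what changed: Instead of walking every index in range(totallen) and testing membership, B builds the position set once and computes the answer as (number of excluded cells) plus one extra point per included-to-excluded boundary, found by scanning the set of positions only.
import Mathlib
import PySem

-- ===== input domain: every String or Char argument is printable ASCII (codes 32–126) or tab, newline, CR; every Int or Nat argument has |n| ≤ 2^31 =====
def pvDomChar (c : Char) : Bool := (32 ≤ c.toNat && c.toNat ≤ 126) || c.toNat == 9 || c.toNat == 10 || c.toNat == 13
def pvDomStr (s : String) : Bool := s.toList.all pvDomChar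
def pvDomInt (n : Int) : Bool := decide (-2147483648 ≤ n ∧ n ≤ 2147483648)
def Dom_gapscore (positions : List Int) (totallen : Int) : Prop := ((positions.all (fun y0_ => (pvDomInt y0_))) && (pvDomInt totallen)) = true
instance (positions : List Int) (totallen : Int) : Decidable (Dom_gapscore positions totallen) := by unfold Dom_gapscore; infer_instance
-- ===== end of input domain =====

-- B replaces A's walk over every index of range(totallen) by a count computed from the position set alone
-- (excluded-cell count plus one extra point per included→excluded boundary); objective: faster.

-- ===== PORT A =====
-- the loop body of A, kept as a named helper
def stepA (positions : List Int) (s : Bool × Int) (i : Int) : Bool × Int :=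
  if !(positions.contains i) then (false, s.2 + (if !s.1 then 1 else 2)) else (true, s.2)

def gapscore (positions : List Int) (totallen : Int) : Int :=
  ((PySem.List.pyRange 0 totallen 1).foldl (stepA positions) (false, 0)).2

-- ===== PORT B =====
def gapscore_alt (positions : List Int) (totallen : Int) : Int :=
  let ps : PySem.Set Int := PySem.Set.ofList positions
  let included : List Int := ps.filter (fun p => decide (0 ≤ p) && decide (p < totallen))
  let extra : Int := (included.countP (fun p => decide (p + 1 < totallen) && !(PySem.Set.contains ps (p + 1))) : Nat)
  max totallen 0 - included.length + extra

-- ===== PRECONDITION & SPEC =====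
def Spec_gapscore (positions : List Int) (totallen : Int) (out : Int) : Prop := out = gapscore_alt positions totallen
instance (positions : List Int) (totallen : Int) (out : Int) : Decidable (Spec_gapscore positions totallen out) := by unfold Spec_gapscore; infer_instance

-- ===== CLAIM (what is proved, stated in full; the proofs are below) =====
def Claim_equal_gapscore : Prop := ∀ (positions : List Int) (totallen : Int), Dom_gapscore positions totallen → Spec_gapscore positions totallen (gapscore positions totallen)

-- ===== LEMMAS AND PROOFS =====

lemma countP_range_intEq (a : Int) (n : Nat) :
    (List.range n).countP (fun i : Nat => ((i : Int) == a)) = if 0 ≤ a ∧ a < (n : Int) then 1 else 0 := by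
  induction n with
  | zero => simp only [List.range_zero, List.countP_nil]; split <;> omega
  | succ m ih =>
    rw [List.range_succ, List.countP_append, ih]
    by_cases h : (m : Int) = a
    · simp [h]; omega
    · simp [h]; split <;> split <;> omega

lemma countP_or_disjoint {α : Type} (xs : List α) (p q : α → Bool)
    (h : ∀ x ∈ xs, ¬(p x = true ∧ q x = true)) :
    xs.countP (fun x => p x || q x) = xs.countP p + xs.countP q := by
  induction xs with
  | nil => simp
  | cons a t ih =>
    have ht : ∀ x ∈ t, ¬(p x = true ∧ q x = true) := fun x hx => h x (by simp [hx])
    have key := ih ht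
    by_cases hp : p a
    · have hq : q a = false := by
        rcases Bool.eq_false_or_eq_true (q a) with h' | h'
        · exact absurd ⟨hp, h'⟩ (h a (by simp))
        · exact h'
      simp [List.countP_cons, hp, hq, key]
      omega
    · by_cases hq : q a <;> simp [List.countP_cons, hp, hq, key] <;> omega

lemma countP_range_lt_pad (f : Nat → Bool) (n : Nat) :
    (List.range n).countP (fun i => decide (i + 1 < n) && f i) +
      (if 0 < n then (if f (n - 1) then 1 else 0) else 0) = (List.range n).countP f := by
  cases n with
  | zero => simp
  | succ m =>
    rw [List.range_succ, List.countP_append, List.countP_append]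
    have h : (List.range m).countP (fun i => decide (i + 1 < m + 1) && f i) = (List.range m).countP f := by
      apply List.countP_congr
      intro i hi
      have h2 : i + 1 < m + 1 := by simpa using List.mem_range.mp hi
      simp [h2]
    rw [h]
    simp [List.countP_cons]

lemma countP_shift (f : Nat → Bool) (n : Nat) :
    (List.range n).countP (fun i => decide (0 < i) && f (i - 1)) =
    (List.range n).countP (fun i => decide (i + 1 < n) && f i) := by
  induction n with
  | zero => simp
  | succ m ih =>
    have h1 : (List.range (m + 1)).countP (fun i => decide (i + 1 < m + 1) && f i) =
        (List.range m).countP f := by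
      rw [List.range_succ, List.countP_append]
      have h : (List.range m).countP (fun i => decide (i + 1 < m + 1) && f i) = (List.range m).countP f := by
        apply List.countP_congr
        intro i hi
        have h2 : i + 1 < m + 1 := by simpa using List.mem_range.mp hi
        simp [h2]
      rw [h]; simp
    conv_lhs => rw [List.range_succ]
    rw [List.countP_append, ih, h1, ← countP_range_lt_pad f m]
    simp [List.countP_cons]
    cases m with
    | zero => simp
    | succ k => simp

lemma count_filter_eq (l : List Int) (hl : l.Nodup) (n : Nat) (C : Int → Bool)
    (hC : ∀ p, C p = true → 0 ≤ p ∧ p < (n : Int)) :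
    (l.filter C).length = (List.range n).countP (fun i : Nat => l.contains (i : Int) && C (i : Int)) := by
  induction l with
  | nil => simp
  | cons a t ih =>
    have hna : a ∉ t := (List.nodup_cons.mp hl).1
    have hnt : t.Nodup := (List.nodup_cons.mp hl).2
    have hsplit : (List.range n).countP (fun i : Nat => (a :: t).contains (i : Int) && C (i : Int)) =
        (List.range n).countP (fun i : Nat => (((i : Int) == a) && C (i : Int))) +
        (List.range n).countP (fun i : Nat => (t.contains (i : Int) && C (i : Int))) := by
      rw [← countP_or_disjoint]
      · apply List.countP_congr
        intro i _
        simp [List.contains_cons, Bool.and_or_distrib_right]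
      · intro i _ hiq
        obtain ⟨h1, h2⟩ := hiq
        simp only [Bool.and_eq_true, beq_iff_eq] at h1 h2
        exact hna (h1.1 ▸ (by simpa using h2.1))
    have hfirst : (List.range n).countP (fun i : Nat => (((i : Int) == a) && C (i : Int))) =
        if C a then 1 else 0 := by
      by_cases hca : C a
      · have h' : (List.range n).countP (fun i : Nat => (((i : Int) == a) && C (i : Int))) =
            (List.range n).countP (fun i : Nat => ((i : Int) == a)) := by
          apply List.countP_congr
          intro i _
          by_cases h : (i : Int) = a <;> simp [h, hca]
        rw [h', countP_range_intEq]
        simp [hC a hca, hca]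
      · have h' : (List.range n).countP (fun i : Nat => (((i : Int) == a) && C (i : Int))) =
            (List.range n).countP (fun _ : Nat => false) := by
          apply List.countP_congr
          intro i _
          by_cases h : (i : Int) = a <;> simp [h, hca]
        simp [h', hca]
    rw [hsplit, hfirst, ← ih hnt]
    by_cases hca : C a <;> simp [List.filter_cons, hca]
    omega

def loopA (positions : List Int) : Nat → Bool × Int
  | 0 => (false, 0)
  | n + 1 => stepA positions (loopA positions n) (n : Int)

def lastB (positions : List Int) : Nat → Bool
  | 0 => false
  | n + 1 => positions.contains (n : Int)

def cntN (positions : List Int) (n : Nat) : Nat :=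
  (List.range n).countP (fun i : Nat => positions.contains (i : Int))

def extN (positions : List Int) (n : Nat) : Nat :=
  (List.range n).countP (fun i : Nat => !positions.contains (i : Int) && (decide (0 < i) && positions.contains ((i : Int) - 1)))

lemma fold_eq_loopA (positions : List Int) (n : Nat) :
    (PySem.List.pyRange 0 (n : Int) 1).foldl (stepA positions) (false, 0) = loopA positions n := by
  induction n with
  | zero => simp [PySem.List.pyRange_one_eq_nil, loopA]
  | succ m ih =>
    have hc : ((m + 1 : Nat) : Int) = (m : Int) + 1 := by push_cast; ring
    rw [hc, PySem.List.pyRange_one_succ_right (by positivity), List.foldl_append]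
    simp [loopA, ih]

lemma loopA_closed (positions : List Int) (n : Nat) :
    loopA positions n = (lastB positions n, (n : Int) - cntN positions n + extN positions n) := by
  induction n with
  | zero => simp [loopA, lastB, cntN, extN]
  | succ m ih =>
    have hcnt : (cntN positions (m + 1) : Int) = cntN positions m + (if positions.contains (m : Int) then 1 else 0) := by
      rw [cntN, List.range_succ, List.countP_append, cntN]
      by_cases h : positions.contains (m : Int) <;> simp [h]
    have hext : (extN positions (m + 1) : Int) = extN positions m +
        (if (!positions.contains (m : Int) && (decide (0 < m) && positions.contains ((m : Int) - 1))) then 1 else 0) := by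
      rw [extN, List.range_succ, List.countP_append, extN]
      by_cases h : (!positions.contains (m : Int) && (decide (0 < m) && positions.contains ((m : Int) - 1))) <;> simp [h]
    rw [loopA, ih]
    have hlast : lastB positions m = (decide (0 < m) && positions.contains ((m : Int) - 1)) := by
      cases m with
      | zero => simp [lastB]
      | succ k =>
        have hk : ((k + 1 : Nat) : Int) - 1 = (k : Int) := by push_cast; ring
        simp [lastB, hk]
    by_cases hm : positions.contains (m : Int)
    · simp only [hm] at hcnt hext
      simp only [stepA, hm, Bool.not_true, Bool.false_eq_true, if_neg, ite_false, Bool.and_false,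
        Bool.false_and, Prod.mk.injEq]
      refine ⟨by simpa [lastB] using hm, ?_⟩
      simp at hcnt hext
      omega
    · simp only [Bool.not_eq_true] at hm
      simp only [hm] at hcnt hext
      by_cases hb : (decide (0 < m) && positions.contains ((m : Int) - 1)) = true
      · simp only [hb] at hcnt hext
        simp only [stepA, hm, Bool.not_false, if_pos, ite_true, hlast, hb, Prod.mk.injEq]
        refine ⟨by simpa [lastB] using hm, ?_⟩
        simp at hcnt hext
        simp only [Bool.not_true, Bool.false_eq_true, if_false]
        omega
      · simp only [Bool.not_eq_true] at hb
        simp only [hb] at hcnt hext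
        simp only [stepA, hm, Bool.not_false, if_pos, ite_true, hlast, hb, Prod.mk.injEq]
        refine ⟨by simpa [lastB] using hm, ?_⟩
        simp at hcnt hext
        omega

lemma contains_ofList (xs : List Int) (x : Int) :
    (PySem.Set.ofList xs).contains x = xs.contains x := by
  by_cases h : x ∈ xs <;> simp [h, PySem.Set.mem_ofList]

lemma gapscore_eq_alt (positions : List Int) (totallen : Int) :
    gapscore positions totallen = gapscore_alt positions totallen := by
  by_cases h0 : totallen ≤ 0
  · have hnil : PySem.List.pyRange 0 totallen 1 = [] := PySem.List.pyRange_one_eq_nil h0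
    have hinc : (PySem.Set.ofList positions).filter
        (fun p => decide (0 ≤ p) && decide (p < totallen)) = [] := by
      rw [List.filter_eq_nil_iff]
      intro p _
      simp
      omega
    simp [gapscore, gapscore_alt, hnil, hinc]
    omega
  · push_neg at h0
    set n := totallen.toNat with hndef
    have ht : (n : Int) = totallen := Int.toNat_of_nonneg (le_of_lt h0)
    -- A side
    have hA : gapscore positions totallen = (n : Int) - cntN positions n + extN positions n := by
      rw [gapscore, ← ht, fold_eq_loopA, loopA_closed]
    -- B side
    have hnodup := PySem.Set.nodup_ofList (xs := positions)
    have hco : ∀ x : Int, (PySem.Set.ofList positions).contains x = positions.contains x :=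
      contains_ofList positions
    -- (b1) length of included
    have hb1 : ((PySem.Set.ofList positions).filter
        (fun p => decide (0 ≤ p) && decide (p < totallen))).length = cntN positions n := by
      rw [count_filter_eq _ hnodup n _ (by intro p hp; simp at hp; omega)]
      apply List.countP_congr
      intro i hi
      have him : i < n := List.mem_range.mp hi
      have h1 : (0:Int) ≤ (i:Int) := by positivity
      have h2 : (i:Int) < totallen := by omega
      simp [hco, h1, h2]
    have hb2 : (((PySem.Set.ofList positions).filter
        (fun p => decide (0 ≤ p) && decide (p < totallen))).countP
        (fun p => decide (p + 1 < totallen) && !(PySem.Set.contains (PySem.Set.ofList positions) (p + 1))))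
        = extN positions n := by
      rw [List.countP_filter, List.countP_eq_length_filter,
        count_filter_eq _ hnodup n _ (by intro p hp; simp at hp; omega)]
      have h4 : ∀ i ∈ List.range n,
          (List.contains (PySem.Set.ofList positions) (i:Int) &&
            ((decide ((i:Int) + 1 < totallen) && !(PySem.Set.contains (PySem.Set.ofList positions) ((i:Int) + 1))) &&
             (decide (0 ≤ (i:Int)) && decide ((i:Int) < totallen))))
          = (decide (i + 1 < n) && (positions.contains (i:Int) && !positions.contains ((i:Int) + 1))) := by
        intro i hi
        have him : i < n := List.mem_range.mp hi
        have h1 : (0:Int) ≤ (i:Int) := by positivity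
        have h2 : (i:Int) < totallen := by omega
        by_cases hin : i + 1 < n
        · have h3 : ((i:Int) + 1 < totallen) := by omega
          simp [hco, h1, h2, h3, hin]
        · have h3 : ¬ ((i:Int) + 1 < totallen) := by omega
          simp [hco, h1, h2, h3, hin]
      trans (List.range n).countP (fun i : Nat => decide (i + 1 < n) && (positions.contains (i:Int) && !positions.contains ((i:Int) + 1)))
      · apply List.countP_congr
        intro i hi
        rw [h4 i hi]
      rw [← countP_shift, extN]
      apply List.countP_congr
      intro i hi
      cases i with
      | zero => simp
      | succ k =>
        push_cast
        rw [show ((k:Int) + 1 - 1) = (k:Int) by ring]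
        by_cases ha : positions.contains ((k:Int) + 1) <;>
          by_cases hb : positions.contains (k:Int) <;>
            simp [ha, hb, and_comm]
    rw [hA]
    simp only [gapscore_alt]
    rw [hb1, hb2]
    have hmax : max totallen 0 = totallen := by omega
    rw [hmax]
    omega

-- ===== VERDICT (by name: the statement is the Claim_ definition above) =====
theorem gapscore_spec : Claim_equal_gapscore := by
  intro positions totallen _
  unfold Spec_gapscore
  exact gapscore_eq_alt positions totallen
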